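-- pv_equiv track=rewrite | github.com/akchau/Algoritmix_task_1_sprint | 2.py | count_point
-- ===== SOURCE A (Python) =====
-- from collections import Counter
--
-- def get_uniq_arr(arr):
--     unique_arr = []
--     for element in arr:
--         if element in unique_arr:
--             continue
--         unique_arr.append(element)
--     return unique_arr
--
-- def count_point(n, arr):
--     unique_arr = get_uniq_arr(arr)
--     summ_point = 0
--     c = Counter(arr)
--     for element_of_unique_arr in unique_arr:
--         if c[element_of_unique_arr] <= n*2:
--             summ_point += 1
--     return summ_point
-- ===== SOURCE B (Python) =====
-- def count_point(n, arr):
--     # sort a copy, then one linear sweep over maximal runs of equal elements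
--     total = 0
--     run_val = None
--     run_len = 0
--     limit = 2 * n
--     for x in sorted(arr):
--         if run_len > 0 and x == run_val:
--             run_len += 1
--         else:
--             if run_len > 0 and run_len <= limit:
--                 total += 1
--             run_val = x
--             run_len = 1
--     if run_len > 0 and run_len <= limit:
--         total += 1
--     return total
-- ===== Notes on version B (the rewrite author's own statement) =====
-- stated objective: faster
-- what changed: Replaced A's quadratic first-occurrence dedup list plus Counter lookups with sorting a copy and one linear sweep over maximal runs of equal elements, counting runs of length <= 2n.
import Mathlib
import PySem

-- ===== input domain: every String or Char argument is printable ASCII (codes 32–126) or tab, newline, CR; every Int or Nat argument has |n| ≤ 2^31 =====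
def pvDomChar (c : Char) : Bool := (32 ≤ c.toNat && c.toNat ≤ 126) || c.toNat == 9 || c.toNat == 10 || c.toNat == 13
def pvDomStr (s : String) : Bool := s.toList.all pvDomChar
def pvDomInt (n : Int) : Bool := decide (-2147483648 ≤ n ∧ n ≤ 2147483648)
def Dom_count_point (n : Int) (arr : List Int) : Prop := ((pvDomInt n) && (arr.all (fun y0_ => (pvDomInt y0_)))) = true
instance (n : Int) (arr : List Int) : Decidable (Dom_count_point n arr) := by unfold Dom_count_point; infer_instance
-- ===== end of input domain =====

-- B replaces A's quadratic dedup-list + Counter with sort-then-single-run-sweep; return value only, no mutation.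

-- ===== PORT A =====
def get_uniq_arr (arr : List Int) : List Int :=
  arr.foldl (fun unique_arr element =>
    if unique_arr.contains element then unique_arr else unique_arr ++ [element]) []

def count_point (n : Int) (arr : List Int) : Int :=
  let unique_arr := get_uniq_arr arr
  let c := PySem.Dict.counter arr
  unique_arr.foldl
    (fun summ_point e => if c.getD e 0 ≤ n * 2 then summ_point + 1 else summ_point) 0

-- ===== PORT B =====
-- loop body of B's sweep: state = (total, run_val, run_len)
def pvStep (limit : Int) (st : Int × Option Int × Int) (x : Int) : Int × Option Int × Int :=
  if 0 < st.2.2 ∧ st.2.1 = some x then (st.1, st.2.1, st.2.2 + 1)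
  else ((if 0 < st.2.2 ∧ st.2.2 ≤ limit then st.1 + 1 else st.1), some x, 1)

-- B's final flush after the loop
def pvFinish (limit : Int) (st : Int × Option Int × Int) : Int :=
  if 0 < st.2.2 ∧ st.2.2 ≤ limit then st.1 + 1 else st.1

def count_point_alt (n : Int) (arr : List Int) : Int :=
  let limit := 2 * n
  pvFinish limit ((PySem.List.sorted arr (fun x => x) false).foldl (pvStep limit) (0, none, 0))

-- ===== PRECONDITION & SPEC =====
def Spec_count_point (n : Int) (arr : List Int) (out : Int) : Prop := out = count_point_alt n arr
instance (n : Int) (arr : List Int) (out : Int) : Decidable (Spec_count_point n arr out) := by unfold Spec_count_point; infer_instance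

-- ===== CLAIM (what is proved, stated in full; the proofs are below) =====
def Claim_equal_count_point : Prop := ∀ (n : Int) (arr : List Int), Dom_count_point n arr → Spec_count_point n arr (count_point n arr)

-- ===== LEMMAS AND PROOFS =====

-- number of distinct values of t whose multiplicity in t is ≤ lim
def pvG (lim : Int) (t : List Int) : Int :=
  ((PySem.Set.ofList t).countP (fun u => decide ((t.count u : Int) ≤ lim)) : Int)

lemma pvG_nil (lim : Int) : pvG lim [] = 0 := rfl

lemma pvFoldl_count (p : Int → Prop) [DecidablePred p] (l : List Int) (a : Int) :
    l.foldl (fun acc x => if p x then acc + 1 else acc) a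
      = a + (l.countP (fun x => decide (p x)) : Int) := by
  induction l generalizing a with
  | nil => simp
  | cons x t ih =>
    rw [List.foldl_cons, ih, List.countP_cons]
    by_cases h : p x <;> simp [h] <;> push_cast <;> ring

lemma pvG_perm (lim : Int) {s t : List Int} (h : s.Perm t) : pvG lim s = pvG lim t := by
  unfold pvG
  have hmem : ∀ a : Int, a ∈ PySem.Set.ofList s ↔ a ∈ PySem.Set.ofList t := by
    intro a; simp [PySem.Set.mem_ofList, h.mem_iff]
  have hperm : (PySem.Set.ofList s).Perm (PySem.Set.ofList t) :=
    (List.perm_ext_iff_of_nodup (PySem.Set.nodup_ofList s) (PySem.Set.nodup_ofList t)).2 hmem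
  rw [hperm.countP_eq]
  congr 1
  apply List.countP_congr
  intro a _
  simp [h.count_eq]

lemma pvG_cons (lim : Int) (x : Int) (t : List Int) :
    pvG lim (x :: t) =
      (if ((t.count x : Int) + 1 ≤ lim) then 1 else 0) + pvG lim (t.filter (fun y => y ≠ x)) := by
  unfold pvG
  have hnodup₂ : (x :: PySem.Set.ofList (t.filter (fun y => y ≠ x))).Nodup := by
    refine List.nodup_cons.2 ⟨?_, PySem.Set.nodup_ofList _⟩
    intro hx
    have := (PySem.Set.mem_ofList _ _).1 hx
    simp at this
  have hperm : (PySem.Set.ofList (x :: t)).Perm (x :: PySem.Set.ofList (t.filter (fun y => y ≠ x))) := by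
    refine (List.perm_ext_iff_of_nodup (PySem.Set.nodup_ofList _) hnodup₂).2 ?_
    intro a
    by_cases hax : a = x <;>
      simp [PySem.Set.mem_ofList, hax, List.mem_filter]
  rw [hperm.countP_eq, List.countP_cons]
  have hrest : (PySem.Set.ofList (t.filter (fun y => y ≠ x))).countP
      (fun u => decide (((x :: t).count u : Int) ≤ lim)) =
      (PySem.Set.ofList (t.filter (fun y => y ≠ x))).countP
      (fun u => decide (((t.filter (fun y => y ≠ x)).count u : Int) ≤ lim)) := by
    apply List.countP_congr
    intro a ha
    have hmem := (PySem.Set.mem_ofList _ _).1 ha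
    have hax : a ≠ x := by
      rcases List.mem_filter.1 hmem with ⟨_, h2⟩; simpa using h2
    simp [List.count_cons, List.count_filter, hax, Ne.symm hax]
  rw [hrest]
  have hcx : (x :: t).count x = t.count x + 1 := by simp
  rw [hcx]
  push_cast
  by_cases h : ((t.count x : Int) + 1 ≤ lim) <;> simp [h] <;> push_cast <;> ring

-- main sweep invariant: over a sorted tail l, with current run (v, len)
lemma pvSweep_go (lim : Int) (l : List Int) (hs : l.Pairwise (· ≤ ·)) :
    ∀ (total v len : Int), 1 ≤ len → (∀ x ∈ l, v ≤ x) →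
      pvFinish lim (l.foldl (pvStep lim) (total, some v, len)) =
        total + (if len + (l.count v : Int) ≤ lim then 1 else 0)
              + pvG lim (l.filter (fun y => y ≠ v)) := by
  induction l with
  | nil =>
    intro total v len hlen _
    simp only [List.foldl_nil, List.count_nil, List.filter_nil, pvG_nil, pvFinish]
    push_cast
    split_ifs <;> omega
  | cons x t ih =>
    intro total v len hlen hv
    have hvx : v ≤ x := hv x (List.mem_cons_self)
    have hxt : ∀ y ∈ t, x ≤ y := fun y hy => (List.pairwise_cons.1 hs).1 y hy
    have hst : t.Pairwise (· ≤ ·) := (List.pairwise_cons.1 hs).2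
    by_cases hx : v = x
    · subst hx
      have hstep : pvStep lim (total, some v, len) v = (total, some v, len + 1) := by
        simp [pvStep]; omega
      rw [List.foldl_cons, hstep]
      rw [ih hst total v (len + 1) (by omega) (fun y hy => le_trans hvx (hxt y hy))]
      have hcv : (v :: t).count v = t.count v + 1 := by simp
      have hf : (v :: t).filter (fun y => y ≠ v) = t.filter (fun y => y ≠ v) := by
        simp [List.filter_cons]
      rw [hcv, hf]
      push_cast
      split_ifs <;> omega
    · have hvlt : v < x := lt_of_le_of_ne hvx hx
      have hnt : ∀ y ∈ t, v < y := fun y hy => lt_of_lt_of_le hvlt (hxt y hy)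
      have hct : t.count v = 0 := by
        rw [List.count_eq_zero]
        intro hmem
        exact absurd rfl (ne_of_gt (hnt v hmem))
      have hcv : (x :: t).count v = 0 := by
        simp [List.count_cons, hct, Ne.symm hx]
      have hstep : pvStep lim (total, some v, len) x =
          ((if 0 < len ∧ len ≤ lim then total + 1 else total), some x, 1) := by
        simp [pvStep, hx]
      rw [List.foldl_cons, hstep]
      rw [ih hst _ x 1 (by omega) hxt]
      have hfv : t.filter (fun y => y ≠ v) = t :=
        List.filter_eq_self.2 (fun a ha => by simp [ne_of_gt (hnt a ha)])
      have hfx : (x :: t).filter (fun y => y ≠ v) = x :: t := by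
        apply List.filter_eq_self.2
        intro a ha
        rcases List.mem_cons.1 ha with rfl | hat
        · simp [Ne.symm hx]
        · simp [ne_of_gt (hnt a hat)]
      rw [hfx, pvG_cons lim x t, hcv]
      push_cast
      split_ifs <;> omega

lemma pvB_eq_G (n : Int) (arr : List Int) : count_point_alt n arr = pvG (2 * n) arr := by
  have hperm : (PySem.List.sorted arr (fun x => x) false).Perm arr := PySem.List.sorted_perm _ _ _
  have hpw : (PySem.List.sorted arr (fun x => x) false).Pairwise (· ≤ ·) := by
    have := PySem.List.sorted_pairwise arr (fun x => x) (κ := Int)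
    simpa using this
  rw [← pvG_perm (2 * n) hperm]
  simp only [count_point_alt]
  cases hsort : PySem.List.sorted arr (fun x => x) false with
  | nil => simp [pvFinish, pvG_nil]
  | cons a t =>
    rw [hsort] at hpw
    have hstep : pvStep (2 * n) (0, none, (0 : Int)) a = (0, some a, 1) := by
      simp [pvStep]
    rw [List.foldl_cons, hstep]
    rw [pvSweep_go (2 * n) t (List.pairwise_cons.1 hpw).2 0 a 1 (by omega)
        (fun y hy => (List.pairwise_cons.1 hpw).1 y hy)]
    rw [pvG_cons (2 * n) a t]
    push_cast
    split_ifs <;> omega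

lemma pvA_eq_G (n : Int) (arr : List Int) : count_point n arr = pvG (2 * n) arr := by
  simp only [count_point]
  have huniq : get_uniq_arr arr = PySem.Set.ofList arr := rfl
  rw [huniq]
  rw [pvFoldl_count (fun e => (PySem.Dict.counter arr).getD e 0 ≤ n * 2)]
  rw [zero_add]
  unfold pvG
  congr 1
  apply List.countP_congr
  intro a _
  simp only [PySem.Dict.getD_counter]
  simp only [decide_eq_true_eq]
  omega

-- ===== VERDICT (by name: the statement is the Claim_ definition above) =====
theorem count_point_spec : Claim_equal_count_point := by
  intro n arr _
  unfold Spec_count_point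
  rw [pvA_eq_G, pvB_eq_G]
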